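-- pv_equiv track=rewrite | github.com/orihamama/tokscope | src/tokenscope/bash_parse.py | _strip_leading_comments
-- ===== SOURCE A (Python) =====
-- def _strip_leading_comments(s: str) -> str:
--     """Drop leading comment lines and blank lines from a multi-line script."""
--     lines = s.splitlines()
--     out: list[str] = []
--     skipping = True
--     for ln in lines:
--         if skipping:
--             t = ln.strip()
--             if not t or t.startswith("#"):
--                 continue
--             skipping = False
--         out.append(ln)
--     return "\n".join(out)
-- ===== SOURCE B (Python) =====
-- def _strip_leading_comments(s: str) -> str:
--     """Drop leading comment lines and blank lines from a multi-line script."""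
--     lines = s.splitlines()
--     i = len(lines)
--     for j, ln in enumerate(lines):
--         t = ln.strip()
--         if t and not t.startswith("#"):
--             i = j
--             break
--     return "\n".join(lines[i:])
-- ===== Notes on version B (the rewrite author's own statement) =====
-- stated objective: idiomatic
-- what changed: Replaces the stateful append loop with a two-phase find-the-boundary-index then slice-and-join; no per-line accumulator or skipping flag.
import Mathlib
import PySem

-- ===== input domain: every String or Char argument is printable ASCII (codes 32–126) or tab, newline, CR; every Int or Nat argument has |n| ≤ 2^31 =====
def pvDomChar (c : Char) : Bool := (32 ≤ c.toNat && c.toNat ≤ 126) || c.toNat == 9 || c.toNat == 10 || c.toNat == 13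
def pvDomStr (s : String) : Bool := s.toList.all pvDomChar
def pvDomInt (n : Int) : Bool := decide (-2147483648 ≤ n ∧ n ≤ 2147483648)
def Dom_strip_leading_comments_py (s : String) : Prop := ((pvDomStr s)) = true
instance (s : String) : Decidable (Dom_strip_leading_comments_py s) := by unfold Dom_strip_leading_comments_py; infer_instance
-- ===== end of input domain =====

-- B is the same linear scan reorganised as an idiomatic find-boundary-then-slice-and-join; return values are proved equal on all inputs.

-- ===== PORT A =====
-- A's loop body: output accumulator plus the 'skipping' flag.
def pvStepA (acc : List String × Bool) (ln : String) : List String × Bool :=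
  match acc with
  | (out, true) =>
    let t := PySem.Str.strip ln
    if t = "" || PySem.Str.startswith t "#" then (out, true)
    else (out ++ [ln], false)
  | (out, false) => (out ++ [ln], false)

def strip_leading_comments_py (s : String) : String :=
  let lines := PySem.Str.splitlines s
  let st := lines.foldl pvStepA ([], true)
  PySem.Str.join "\n" st.1

-- ===== PORT B =====
-- B helper: the enumerate loop with break — index of the first kept line, default len(lines).
def pvFindStart : List String → Nat → Nat
  | [], j => j
  | ln :: rest, j =>
    let t := PySem.Str.strip ln
    if t ≠ "" ∧ ¬ PySem.Str.startswith t "#" = true then j else pvFindStart rest (j + 1)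

def strip_leading_comments_py_alt (s : String) : String :=
  let lines := PySem.Str.splitlines s
  let i := pvFindStart lines 0
  PySem.Str.join "\n" (PySem.List.slice lines (some (i : Int)) none)

-- ===== PRECONDITION & SPEC =====
def Spec_strip_leading_comments_py (s : String) (out : String) : Prop := out = strip_leading_comments_py_alt s
instance (s : String) (out : String) : Decidable (Spec_strip_leading_comments_py s out) := by unfold Spec_strip_leading_comments_py; infer_instance

-- ===== CLAIM (what is proved, stated in full; the proofs are below) =====
def Claim_equal_strip_leading_comments_py : Prop := ∀ (s : String), Dom_strip_leading_comments_py s → Spec_strip_leading_comments_py s (strip_leading_comments_py s)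

-- ===== LEMMAS AND PROOFS =====

-- once skipping is false, A's loop appends every remaining line
theorem pv_fold_nonskip (lines : List String) (out : List String) :
    lines.foldl pvStepA (out, false) = (out ++ lines, false) := by
  induction lines generalizing out with
  | nil => simp
  | cons ln rest ih =>
    rw [List.foldl_cons]
    have hstep : pvStepA (out, false) ln = (out ++ [ln], false) := rfl
    rw [hstep, ih]
    simp

theorem pv_findStart_shift (lines : List String) (j : Nat) :
    pvFindStart lines (j + 1) = pvFindStart lines j + 1 := by
  induction lines generalizing j with
  | nil => simp [pvFindStart]
  | cons ln rest ih =>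
    simp only [pvFindStart]
    split_ifs <;> simp [ih]

-- A's accumulated output is exactly the suffix of the lines from B's boundary index
theorem pv_fold_skip (lines : List String) (out : List String) :
    (lines.foldl pvStepA (out, true)).1 = out ++ lines.drop (pvFindStart lines 0) := by
  induction lines generalizing out with
  | nil => simp [pvFindStart]
  | cons ln rest ih =>
    rw [List.foldl_cons]
    by_cases hb : (PySem.Str.strip ln = "" || PySem.Str.startswith (PySem.Str.strip ln) "#") = true
    · have hstep : pvStepA (out, true) ln = (out, true) := by
        simp only [pvStepA]
        rw [if_pos hb]
      have hc : ¬ (PySem.Str.strip ln ≠ "" ∧ ¬ PySem.Str.startswith (PySem.Str.strip ln) "#" = true) := by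
        simp only [Bool.or_eq_true, decide_eq_true_eq] at hb
        tauto
      rw [hstep, ih]
      simp only [pvFindStart]
      rw [if_neg hc, pv_findStart_shift, List.drop_succ_cons]
    · have hstep : pvStepA (out, true) ln = (out ++ [ln], false) := by
        simp only [pvStepA]
        rw [if_neg hb]
      have hc : (PySem.Str.strip ln ≠ "" ∧ ¬ PySem.Str.startswith (PySem.Str.strip ln) "#" = true) := by
        simp only [Bool.or_eq_true, decide_eq_true_eq, not_or, Bool.not_eq_true] at hb
        exact ⟨hb.1, by rw [hb.2]; decide⟩
      rw [hstep, pv_fold_nonskip]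
      simp only [pvFindStart]
      rw [if_pos hc]
      simp

-- ===== VERDICT (by name: the statement is the Claim_ definition above) =====
theorem strip_leading_comments_py_spec : Claim_equal_strip_leading_comments_py := by
  intro s _
  unfold Spec_strip_leading_comments_py
  simp only [strip_leading_comments_py, strip_leading_comments_py_alt]
  rw [pv_fold_skip, PySem.List.slice_from_natCast]
  simp
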